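-- pv_equiv track=rewrite | github.com/yahiahamdan/Leetcode-Problem-Solving- | hackerRank/ibquestion.py | ibmQuestion
-- ===== SOURCE A (Python) =====
-- def ibmQuestion(n):
--     res=[]
--     for i in range(len(n)):
--         counter=0
--         for j in range(i):
--             if n[j]>n[i]:
--                 counter-=abs(n[j]-n[i])
--             elif n[j]<n[i]:
--                 counter+=abs(n[i]-n[j])
--         res.append(counter)
--     return res
-- ===== SOURCE B (Python) =====
-- def ibmQuestion(n):
--     res = []
--     prefix = 0
--     for i, x in enumerate(n):
--         res.append(i * x - prefix)
--         prefix += x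
--     return res
-- ===== Notes on version B (the rewrite author's own statement) =====
-- stated objective: faster
-- what changed: Replaced the quadratic inner scan over all earlier elements by a single pass keeping a running prefix sum: each entry is i*n[i] - prefix, since every branch of A's comparison adds exactly n[i]-n[j].
import Mathlib
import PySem

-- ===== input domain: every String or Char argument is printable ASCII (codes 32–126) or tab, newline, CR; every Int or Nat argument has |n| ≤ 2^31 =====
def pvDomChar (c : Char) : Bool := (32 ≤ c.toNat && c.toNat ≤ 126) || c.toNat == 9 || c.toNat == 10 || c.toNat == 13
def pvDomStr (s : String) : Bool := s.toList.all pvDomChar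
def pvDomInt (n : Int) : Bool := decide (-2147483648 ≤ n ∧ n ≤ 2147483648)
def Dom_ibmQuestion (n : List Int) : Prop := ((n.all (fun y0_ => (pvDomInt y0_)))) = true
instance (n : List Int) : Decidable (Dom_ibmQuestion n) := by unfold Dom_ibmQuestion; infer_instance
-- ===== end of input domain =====

-- B replaces A's quadratic inner scan by a single pass with a running prefix sum (objective: faster).

-- ===== PORT A =====
-- literal transliteration of A's nested loops; indices j < i < len(n) are always in range, so pyGetD is exact
def ibmQuestion (n : List Int) : List Int :=
  (PySem.List.pyRange 0 (n.length : Int) 1).foldl (fun res i =>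
    res ++ [(PySem.List.pyRange 0 i 1).foldl (fun counter j =>
      let nj := PySem.List.pyGetD n j 0
      let ni := PySem.List.pyGetD n i 0
      if nj > ni then counter - |nj - ni|
      else if nj < ni then counter + |ni - nj|
      else counter) 0]) []

-- ===== PORT B =====
-- transliteration of Source B: one enumerate pass with accumulators (res, prefix)
def ibmQuestion_alt (n : List Int) : List Int :=
  ((PySem.List.enumerate n 0).foldl
    (fun (st : List Int × Int) (p : Int × Int) =>
      (st.1 ++ [p.1 * p.2 - st.2], st.2 + p.2)) ([], 0)).1

-- ===== PRECONDITION & SPEC =====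
def Spec_ibmQuestion (n : List Int) (out : List Int) : Prop := out = ibmQuestion_alt n
instance (n : List Int) (out : List Int) : Decidable (Spec_ibmQuestion n out) := by unfold Spec_ibmQuestion; infer_instance

-- ===== CLAIM (what is proved, stated in full; the proofs are below) =====
def Claim_equal_ibmQuestion : Prop := ∀ (n : List Int), Dom_ibmQuestion n → Spec_ibmQuestion n (ibmQuestion n)

-- ===== LEMMAS AND PROOFS =====

-- sum over k < m of (c - n[k]) = m*c - sum(take m n)
lemma sum_range_sub (n : List Int) (c : Int) :
    ∀ m, m ≤ n.length →
      ((List.range m).map (fun k => c - n.getD k 0)).sum = m * c - (n.take m).sum := by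
  intro m
  induction m with
  | zero => simp
  | succ m ih =>
    intro h
    rw [List.range_succ]
    have hm : m < n.length := by omega
    have ht : n.take (m + 1) = n.take m ++ [n[m]] := by
      rw [List.take_add_one]; simp [List.getElem?_eq_getElem hm]
    simp only [List.map_append, List.sum_append, List.map_cons, List.map_nil,
      List.sum_cons, List.sum_nil, ht]
    rw [ih (by omega)]
    rw [List.getD_eq_getElem n 0 hm]
    push_cast
    ring

-- A's inner loop, for 0 ≤ i < len(n), computes i*n[i] - sum(take i n):
-- each branch of the comparison adds exactly n[i] - n[j]
lemma inner_loop_eq (n : List Int) (i : Int) (h0 : 0 ≤ i) (h1 : i < (n.length : Int)) :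
    (PySem.List.pyRange 0 i 1).foldl (fun counter j =>
      let nj := PySem.List.pyGetD n j 0
      let ni := PySem.List.pyGetD n i 0
      if nj > ni then counter - |nj - ni|
      else if nj < ni then counter + |ni - nj|
      else counter) 0
    = i * PySem.List.pyGetD n i 0 - (n.take i.toNat).sum := by
  set ni := PySem.List.pyGetD n i 0 with hni
  have hstep : (fun (counter j : Int) =>
      let nj := PySem.List.pyGetD n j 0
      let ni := ni
      if nj > ni then counter - |nj - ni|
      else if nj < ni then counter + |ni - nj|
      else counter)
      = fun (counter j : Int) => counter + (ni - PySem.List.pyGetD n j 0) := by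
    funext counter j
    set nj := PySem.List.pyGetD n j 0 with hnj
    simp only
    split_ifs with hgt hlt
    · rw [abs_of_pos (by omega)]; ring
    · rw [abs_of_pos (by omega)]
    · omega
  rw [hstep]
  rw [PySem.List.foldl_add (g := fun j => ni - PySem.List.pyGetD n j 0)]
  rw [PySem.List.pyRange_one]
  simp only [List.map_map, Function.comp_def]
  rw [List.map_congr_left (l := List.range (i - 0).toNat)
    (f := fun k : Nat => ni - PySem.List.pyGetD n ((0:Int) + (k : Int)) 0)
    (g := fun k : Nat => ni - n.getD k 0)
    (fun k _ => by simp [PySem.List.pyGetD_natCast])]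
  rw [sum_range_sub n ni (i - 0).toNat (by omega)]
  have hc : (((i - 0).toNat : Int)) = i := by omega
  rw [hc]
  have h2 : (i - 0).toNat = i.toNat := by omega
  rw [h2]
  ring

-- B's fold, generalized over start index, output accumulator and prefix value
lemma alt_fold_eq (n : List Int) :
    ∀ (s : Int) (res : List Int) (pref : Int),
      (PySem.List.enumerate n s).foldl
        (fun (st : List Int × Int) (p : Int × Int) =>
          (st.1 ++ [p.1 * p.2 - st.2], st.2 + p.2)) (res, pref)
      = (res ++ (List.range n.length).map
            (fun (k : Nat) => (s + (k : Int)) * n.getD k 0 - (pref + (n.take k).sum)),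
         pref + n.sum) := by
  induction n with
  | nil => intro s res pref; simp [PySem.List.enumerate_nil]
  | cons x xs ih =>
    intro s res pref
    rw [PySem.List.enumerate_cons, List.foldl_cons]
    rw [ih (s + 1) (res ++ [s * x - pref]) (pref + x)]
    refine Prod.ext ?_ ?_
    · show res ++ [s * x - pref] ++ _ = res ++ _
      rw [List.length_cons, List.range_succ_eq_map, List.map_cons, List.map_map,
        List.append_assoc]
      congr 1
      simp only [List.getD_cons_zero, List.take_zero, List.sum_nil, Nat.cast_zero,
        List.singleton_append, Function.comp_def]
      congr 1
      · ring_nf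
      · apply List.map_congr_left
        intro k _
        simp only [List.getD_cons_succ, List.take_succ_cons, List.sum_cons]
        push_cast
        ring
    · show pref + x + xs.sum = pref + (x :: xs).sum
      simp [List.sum_cons]; ring

-- ===== VERDICT (by name: the statement is the Claim_ definition above) =====
theorem ibmQuestion_spec : Claim_equal_ibmQuestion := by
  intro n _
  unfold Spec_ibmQuestion ibmQuestion ibmQuestion_alt
  rw [alt_fold_eq n 0 [] 0]
  simp only [List.nil_append]
  rw [PySem.List.foldl_append_singleton_eq_map]
  rw [List.nil_append]
  rw [PySem.List.pyRange_one]
  simp only [List.map_map, Function.comp_def]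
  apply List.map_congr_left
  intro k hk
  rw [List.mem_range] at hk
  rw [inner_loop_eq n ((0 : Int) + (k : Int)) (by omega) (by
    have : ((n.length : Int) - 0).toNat = n.length := by omega
    omega)]
  have htn : ((0 : Int) + (k : Int)).toNat = k := by omega
  rw [htn]
  rw [show PySem.List.pyGetD n ((0:Int) + (k:Int)) 0 = n.getD k 0 by
    simp [PySem.List.pyGetD_natCast]]
  ring_nf
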